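-- pv_equiv track=rewrite | github.com/Charlie43/probable-octo-broccoli | cat/main.py | solution
-- ===== SOURCE A (Python) =====
-- def solution(boxes: list):
--     if not boxes or len(boxes) == 0:
--         return 0
--
--     max_dist = 0
--     for i, v in enumerate(boxes):
--         dist = get_distance(i, boxes)
--         if dist > max_dist:
--             max_dist = dist
--     return max_dist
--
-- def get_distance(starting_idx, boxes):
--     fdist = 0
--     bdist = 0
--
--     if starting_idx < len(boxes) - 1:
--         # + 1 due to inclusive slice
--         for i, x in enumerate(boxes[starting_idx + 1:]):
--             if x - boxes[starting_idx + i] > 0: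
--                 fdist = i
--                 break
--         # If we get to the end without stopping, use i + 1 (to include the final digit)
--         else:
--             fdist = i + 1
--
--     if starting_idx > 0:
--         for i, x in enumerate(boxes[:starting_idx][::-1], 0):
--             if x - boxes[starting_idx - i] > 0:
--                 bdist = i
--                 break
--         # If we get to the end without stopping, use i + 1 (to include the final digit)
--         else:
--             bdist = i + 1
--
--     # + 1 to include starting point
--     return (fdist + bdist) + 1
-- ===== SOURCE B (Python) =====
-- def _runs(xs):
--     # out[i] = length of the maximal non-decreasing run of xs ending at i
--     out = [1]
--     for prev, cur in zip(xs, xs[1:]):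
--         out.append(out[-1] + 1 if prev <= cur else 1)
--     return out
--
-- def solution(boxes: list):
--     if not boxes:
--         return 0
--     inc = _runs(boxes)                  # run coming from the left up to i
--     dec = _runs(boxes[::-1])[::-1]      # run going right from i
--     return max(f + b - 1 for f, b in zip(inc, dec))
-- ===== Notes on version B (the rewrite author's own statement) =====
-- stated objective: faster
-- what changed: replaces the per-index forward/backward rescans with two linear DP passes (non-decreasing run ending at i, non-increasing run starting at i) and one max over their pointwise sums
import Mathlib
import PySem

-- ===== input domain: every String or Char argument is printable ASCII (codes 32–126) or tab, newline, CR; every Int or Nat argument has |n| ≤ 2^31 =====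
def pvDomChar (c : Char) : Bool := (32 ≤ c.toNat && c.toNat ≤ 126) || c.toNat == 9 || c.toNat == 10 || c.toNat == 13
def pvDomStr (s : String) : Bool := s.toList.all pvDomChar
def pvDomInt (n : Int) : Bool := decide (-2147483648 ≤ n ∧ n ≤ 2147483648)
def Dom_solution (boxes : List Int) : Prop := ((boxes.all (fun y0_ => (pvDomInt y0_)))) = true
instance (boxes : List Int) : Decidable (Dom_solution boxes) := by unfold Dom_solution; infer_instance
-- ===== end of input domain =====

-- B replaces A's per-index forward/backward rescans with two linear run-length DP passes (measured faster, asymptotic).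

-- ===== PORT A =====
-- forward for-else loop of get_distance over enumerate(boxes[starting_idx+1:]):
-- break returns i, falling off the end returns (last i) + 1.
-- boxes[starting_idx + i] is always in range here, so pyGetD's default is never used.
def fLoop (start : Int) (boxes : List Int) : List (Int × Int) → Int
  | [] => 0  -- unreachable: the loop is only entered on a non-empty slice (fdist's initial value)
  | [(i, x)] => if x - PySem.List.pyGetD boxes (start + i) 0 > 0 then i else i + 1
  | (i, x) :: p :: rest =>
      if x - PySem.List.pyGetD boxes (start + i) 0 > 0 then i else fLoop start boxes (p :: rest)

-- backward for-else loop of get_distance over enumerate(boxes[:starting_idx][::-1], 0)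
def bLoop (start : Int) (boxes : List Int) : List (Int × Int) → Int
  | [] => 0  -- unreachable (bdist's initial value)
  | [(i, x)] => if x - PySem.List.pyGetD boxes (start - i) 0 > 0 then i else i + 1
  | (i, x) :: p :: rest =>
      if x - PySem.List.pyGetD boxes (start - i) 0 > 0 then i else bLoop start boxes (p :: rest)

def getDistance (start : Int) (boxes : List Int) : Int :=
  let fdist : Int :=
    if start < (boxes.length : Int) - 1 then
      fLoop start boxes (PySem.List.enumerate (PySem.List.slice boxes (some (start + 1)) none) 0)
    else 0
  let bdist : Int :=
    if start > 0 then
      -- boxes[:start][::-1] : reverse of the slice (exact: PySem.List.slice?_none_none_neg_one)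
      bLoop start boxes (PySem.List.enumerate (PySem.List.slice boxes none (some start)).reverse 0)
    else 0
  (fdist + bdist) + 1

def solution (boxes : List Int) : Int :=
  if boxes.isEmpty || boxes.length == 0 then 0
  else
    (PySem.List.enumerate boxes 0).foldl
      (fun max_dist p =>
        let dist := getDistance p.1 boxes
        if dist > max_dist then dist else max_dist) 0

-- ===== PORT B =====
-- _runs' loop over zip(xs, xs[1:]), carrying the previous value and out[-1]
def runsAux (prev r : Int) : List Int → List Int
  | [] => []
  | cur :: rest =>
      let r' := if prev ≤ cur then r + 1 else 1
      r' :: runsAux cur r' rest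

def runs : List Int → List Int
  | [] => []
  | x :: rest => 1 :: runsAux x 1 rest

def solution_alt (boxes : List Int) : Int :=
  if boxes.isEmpty then 0
  else
    let inc := runs boxes
    let dec := (runs boxes.reverse).reverse
    -- max(...) over a non-empty generator; the getD default is never used
    (PySem.List.max? ((inc.zip dec).map (fun p => p.1 + p.2 - 1)) (fun y => y)).getD 0

-- ===== PRECONDITION & SPEC =====
def Spec_solution (boxes : List Int) (out : Int) : Prop := out = solution_alt boxes
instance (boxes : List Int) (out : Int) : Decidable (Spec_solution boxes out) := by
  unfold Spec_solution; infer_instance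

-- ===== CLAIM (what is proved, stated in full; the proofs are below) =====
def Claim_equal_solution : Prop := ∀ (boxes : List Int), Dom_solution boxes → Spec_solution boxes (solution boxes)

-- ===== LEMMAS AND PROOFS =====

-- fRun xs = length of the maximal non-increasing prefix of xs (common characterisation of both ports)
def fRun : List Int → Int
  | [] => 0
  | [_] => 1
  | a :: b :: t => if b ≤ a then fRun (b :: t) + 1 else 1

lemma fRun_pos : ∀ (xs : List Int), xs ≠ [] → 1 ≤ fRun xs := by
  intro xs hxs
  match xs with
  | [a] => simp [fRun]
  | a :: b :: t =>
    have := fRun_pos (b :: t) (by simp)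
    simp only [fRun]; split <;> omega

lemma fRun_singleton (xs : List Int) (h : xs.length = 1) : fRun xs = 1 := by
  match xs, h with
  | [a], _ => rfl

lemma pyGetD_add_cast (boxes : List Int) (k j : Nat) (h : k + j < boxes.length) :
    PySem.List.pyGetD boxes ((k : Int) + (j : Int)) 0 = boxes[k + j]'h := by
  have hc : ((k : Int) + (j : Int)) = ((k + j : Nat) : Int) := by push_cast; ring
  rw [hc, PySem.List.pyGetD_natCast, List.getD_eq_getElem]

lemma pyGetD_sub_cast (boxes : List Int) (k j : Nat) (hj : j ≤ k) (h : k - j < boxes.length) :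
    PySem.List.pyGetD boxes ((k : Int) - (j : Int)) 0 = boxes[k - j]'h := by
  have hc : ((k : Int) - (j : Int)) = ((k - j : Nat) : Int) := by omega
  rw [hc, PySem.List.pyGetD_natCast, List.getD_eq_getElem]

lemma fLoop_eq : ∀ (ys boxes : List Int) (k j : Nat),
    boxes.drop (k + j + 1) = ys → ys ≠ [] →
    fLoop (k : Int) boxes (PySem.List.enumerate ys (j : Int))
      = (fRun (boxes.drop (k + j)) - 1) + j := by
  intro ys boxes k j hdrop hne
  have hlen : k + j + 1 + ys.length = boxes.length := by
    have := congrArg List.length hdrop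
    simp only [List.length_drop] at this
    rcases Nat.lt_or_ge (k + j + 1) boxes.length with h | h
    · omega
    · rw [Nat.sub_eq_zero_of_le h] at this
      cases ys with
      | nil => exact absurd rfl hne
      | cons a t => simp at this
  have hlt : k + j < boxes.length := by omega
  have hb : boxes.drop (k + j) = boxes[k + j]'hlt :: ys := by
    rw [List.drop_eq_getElem_cons hlt, hdrop]
  match ys, hne with
  | [x], _ =>
    simp only [PySem.List.enumerate_cons, PySem.List.enumerate_nil, fLoop,
      pyGetD_add_cast boxes k j hlt, hb, fRun]
    split_ifs <;> omega
  | x :: p :: rest, _ =>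
    have ih := fLoop_eq (p :: rest) boxes k (j + 1)
      (by have h2 : k + (j + 1) + 1 = k + j + 1 + 1 := by omega
          rw [h2, show List.drop (k+j+1+1) boxes = (List.drop (k+j+1) boxes).tail by
                simp [List.tail_drop], hdrop]; rfl) (by simp)
    simp only [PySem.List.enumerate_cons, fLoop, pyGetD_add_cast boxes k j hlt]
    rw [show k + (j + 1) = k + j + 1 from by omega] at ih
    simp only [PySem.List.enumerate_cons] at ih
    push_cast at ih ⊢
    by_cases hc : x - boxes[k + j]'hlt > 0
    · rw [if_pos hc, hb]
      simp only [fRun]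
      rw [if_neg (by omega)]
      omega
    · rw [if_neg hc, ih]
      have hstep : fRun (List.drop (k + j) boxes) = fRun (List.drop (k + j + 1) boxes) + 1 := by
        rw [hb, hdrop]
        simp only [fRun]
        split_ifs <;> omega
      omega

lemma bLoop_eq : ∀ (zs boxes : List Int) (k j : Nat), k < boxes.length → j ≤ k →
    ((boxes.take (k+1)).reverse).drop (j+1) = zs → zs ≠ [] →
    bLoop (k : Int) boxes (PySem.List.enumerate zs (j : Int))
      = (fRun (((boxes.take (k+1)).reverse).drop j) - 1) + j := by
  intro zs boxes k j hk hj hdrop hne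
  have hr0len : ((boxes.take (k+1)).reverse).length = k + 1 := by
    simp [List.length_take]; omega
  have hlen : j + 1 + zs.length = k + 1 := by
    have h1 := congrArg List.length hdrop
    simp only [List.length_drop, List.length_reverse, List.length_take] at h1
    cases zs with
    | nil => exact absurd rfl hne
    | cons a t => simp only [List.length_cons] at h1 ⊢; omega
  have hjlt : j < ((boxes.take (k+1)).reverse).length := by omega
  have hkj : k - j < boxes.length := by omega
  have hb : ((boxes.take (k+1)).reverse).drop j
      = ((boxes.take (k+1)).reverse)[j]'hjlt :: zs := by
    rw [List.drop_eq_getElem_cons hjlt, hdrop]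
  have hr0j : ((boxes.take (k+1)).reverse)[j]'hjlt = boxes[k - j]'hkj := by
    rw [List.getElem_reverse]
    rw [List.getElem_take]
    congr 1
    simp [List.length_take]
    omega
  match zs, hne with
  | [x], _ =>
    simp only [PySem.List.enumerate_cons, PySem.List.enumerate_nil, bLoop,
      pyGetD_sub_cast boxes k j hj hkj, hb, hr0j, fRun]
    split_ifs <;> omega
  | x :: p :: rest, _ =>
    have ih := bLoop_eq (p :: rest) boxes k (j + 1) hk (by simp only [List.length_cons] at hlen; omega)
      (by rw [show ((boxes.take (k+1)).reverse).drop (j+1+1)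
                = (((boxes.take (k+1)).reverse).drop (j+1)).tail by simp [List.tail_drop],
              hdrop]; rfl) (by simp)
    simp only [PySem.List.enumerate_cons, bLoop, pyGetD_sub_cast boxes k j hj hkj]
    simp only [PySem.List.enumerate_cons] at ih
    push_cast at ih ⊢
    by_cases hc : x - boxes[k - j]'hkj > 0
    · rw [if_pos hc, hb, hr0j]
      simp only [fRun]
      rw [if_neg (by omega)]
      omega
    · rw [if_neg hc, ih]
      have hstep : fRun (((boxes.take (k+1)).reverse).drop j)
          = fRun (((boxes.take (k+1)).reverse).drop (j+1)) + 1 := by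
        rw [hb, hdrop, hr0j]
        simp only [fRun]
        split_ifs <;> omega
      omega

lemma getDistance_eq (boxes : List Int) (k : Nat) (hk : k < boxes.length) :
    getDistance (k : Int) boxes
      = fRun (boxes.drop k) + fRun ((boxes.take (k+1)).reverse) - 1 := by
  have hfd : (if (k:Int) < (boxes.length:Int) - 1 then
      fLoop (k:Int) boxes (PySem.List.enumerate (PySem.List.slice boxes (some ((k:Int) + 1)) none) 0) else 0)
      = fRun (boxes.drop k) - 1 := by
    by_cases h : (k:Int) < (boxes.length:Int) - 1
    · rw [if_pos h]
      have hsl : PySem.List.slice boxes (some ((k:Int)+1)) none = boxes.drop (k+1) := by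
        rw [show ((k:Int)+1) = ((k+1 : Nat):Int) by push_cast; ring, PySem.List.slice_from_natCast]
      rw [hsl]
      have := fLoop_eq (boxes.drop (k+1)) boxes k 0 (by simp)
        (by simp only [ne_eq, List.drop_eq_nil_iff]; omega)
      simpa using this
    · rw [if_neg h]
      have h1 : (boxes.drop k).length = 1 := by simp; omega
      rw [fRun_singleton _ h1]
      norm_num
  have hbd : (if (k:Int) > 0 then
      bLoop (k:Int) boxes (PySem.List.enumerate (PySem.List.slice boxes none (some (k:Int))).reverse 0) else 0)
      = fRun ((boxes.take (k+1)).reverse) - 1 := by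
    by_cases h : (k:Int) > 0
    · rw [if_pos h]
      have hk1 : 1 ≤ k := by omega
      have hsl : PySem.List.slice boxes none (some (k:Int)) = boxes.take k :=
        PySem.List.slice_to_natCast ..
      have htk : boxes.take (k+1) = boxes.take k ++ [boxes[k]'hk] := by
        rw [List.take_add_one]; simp [List.getElem?_eq_getElem hk]
      have hd1 : ((boxes.take (k+1)).reverse).drop 1 = (boxes.take k).reverse := by
        rw [htk, List.reverse_append]; rfl
      have hne : (boxes.take k).reverse ≠ [] := by
        apply List.ne_nil_of_length_pos
        simp; omega
      have := bLoop_eq ((boxes.take k).reverse) boxes k 0 hk (by omega) (by simpa using hd1) hne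
      rw [hsl]
      simpa using this
    · rw [if_neg h]
      have hk0 : k = 0 := by omega
      have h1 : ((boxes.take (k+1)).reverse).length = 1 := by simp; omega
      rw [fRun_singleton _ h1]
      norm_num
  simp only [getDistance]
  rw [hfd, hbd]
  ring

lemma length_runsAux : ∀ (rest : List Int) (prev r : Int), (runsAux prev r rest).length = rest.length := by
  intro rest
  induction rest with
  | nil => intro _ _; rfl
  | cons c t ih => intro prev r; simp [runsAux, ih]

lemma length_runs (xs : List Int) : (runs xs).length = xs.length := by
  cases xs with
  | nil => rfl
  | cons x rest => simp [runs, length_runsAux]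

lemma runsAux_getElem : ∀ (rest t : List Int) (prev r : Int), r = fRun (prev :: t) →
    ∀ (k : Nat) (hk : k < rest.length),
    (runsAux prev r rest)[k]'(by rw [length_runsAux]; exact hk)
      = fRun ((rest.take (k+1)).reverse ++ prev :: t) := by
  intro rest
  induction rest with
  | nil => intro t prev r hr k hk; simp at hk
  | cons cur rest ih =>
    intro t prev r hr k hk
    match k with
    | 0 =>
      simp only [runsAux, List.getElem_cons_zero]
      have he : (((cur :: rest).take 1).reverse ++ prev :: t) = cur :: prev :: t := by simp
      rw [he, hr]
      simp only [fRun]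
    | (k+1) =>
      simp only [runsAux, List.getElem_cons_succ]
      have hr' : (if prev ≤ cur then r + 1 else 1) = fRun (cur :: prev :: t) := by
        rw [hr]; simp only [fRun]
      have := ih (prev :: t) cur _ hr' k (by simpa using hk)
      rw [this]
      congr 1
      simp

lemma runs_getElem (xs : List Int) (k : Nat) (hk : k < xs.length) :
    (runs xs)[k]'(by rw [length_runs]; exact hk) = fRun ((xs.take (k+1)).reverse) := by
  cases xs with
  | nil => simp at hk
  | cons x rest =>
    match k with
    | 0 => simp [runs, fRun]
    | (k+1) =>
      simp only [runs, List.getElem_cons_succ]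
      have := runsAux_getElem rest [] x 1 rfl k (by simpa using hk)
      rw [this]
      congr 1
      simp

lemma dec_getElem (xs : List Int) (k : Nat) (hk : k < xs.length) :
    ((runs xs.reverse).reverse)[k]'(by simpa [length_runs] using hk)
      = fRun (xs.drop k) := by
  have hlen : (runs xs.reverse).length = xs.length := by rw [length_runs, List.length_reverse]
  rw [List.getElem_reverse]
  have hidx : (runs xs.reverse).length - 1 - k = xs.length - 1 - k := by rw [hlen]
  have h2 : xs.length - 1 - k < xs.reverse.length := by simp; omega
  have := runs_getElem xs.reverse (xs.length - 1 - k) h2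
  simp_rw [hidx]
  rw [this]
  congr 1
  rw [List.take_reverse]
  rw [show xs.length - (xs.length - 1 - k + 1) = k from by omega, List.reverse_reverse]

lemma foldl_if_max (t : List Int) (d : Int) (hd : 0 ≤ d) :
    (d :: t).foldl (fun md x => if x > md then x else md) 0
      = (PySem.List.max? (d :: t) (fun y => y)).getD 0 := by
  rw [PySem.List.max?_id_cons]
  have hf : (fun (md x : Int) => if x > md then x else md) = (fun (md x : Int) => max md x) := by
    funext a b; split_ifs <;> omega
  rw [hf]
  simp only [List.foldl_cons, Option.getD_some]
  rw [show max (0:Int) d = d from by omega]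

lemma solution_eq_alt (boxes : List Int) : solution boxes = solution_alt boxes := by
  cases boxes with
  | nil => rfl
  | cons b0 bs =>
    have hn : 0 < (b0 :: bs).length := by simp
    simp only [solution, solution_alt, List.isEmpty_cons, Bool.false_or, beq_iff_eq]
    rw [if_neg (by simp), if_neg (by simp)]
    have hmap : (PySem.List.enumerate (b0 :: bs) 0).foldl
        (fun max_dist p =>
          let dist := getDistance p.1 (b0 :: bs)
          if dist > max_dist then dist else max_dist) 0
        = ((PySem.List.enumerate (b0 :: bs) 0).map
            (fun p => getDistance p.1 (b0 :: bs))).foldl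
            (fun md x => if x > md then x else md) 0 := by
      rw [List.foldl_map]
    rw [hmap]
    have hlists : ((PySem.List.enumerate (b0 :: bs) 0).map (fun p => getDistance p.1 (b0 :: bs)))
        = (((runs (b0 :: bs)).zip ((runs (b0 :: bs).reverse).reverse)).map
            (fun p => p.1 + p.2 - 1)) := by
      apply List.ext_getElem
      · simp [PySem.List.length_enumerate, length_runs]
      · intro i h1 h2
        have hi : i < (b0 :: bs).length := by
          simpa [PySem.List.length_enumerate] using h1
        simp only [List.getElem_map, List.getElem_zip, PySem.List.getElem_enumerate]
        rw [runs_getElem _ i hi, dec_getElem _ i hi]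
        rw [show ((0:Int) + (i:Nat)) = (i:Int) from by omega]
        rw [getDistance_eq _ i hi]
        ring
    rw [hlists]
    have hlen0 : 0 < (((runs (b0 :: bs)).zip ((runs (b0 :: bs).reverse).reverse)).map
        (fun p => p.1 + p.2 - 1)).length := by
      simp [length_runs]
    have e1 : (((runs (b0 :: bs)).zip ((runs (b0 :: bs).reverse).reverse)).map
        (fun p => p.1 + p.2 - 1))[0]?
        = some (fRun (((b0 :: bs).take 1).reverse) + fRun ((b0 :: bs).drop 0) - 1) := by
      rw [List.getElem?_eq_getElem hlen0]
      congr 1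
      simp only [List.getElem_map, List.getElem_zip]
      rw [runs_getElem _ 0 hn, dec_getElem _ 0 hn]
    cases hL : (((runs (b0 :: bs)).zip ((runs (b0 :: bs).reverse).reverse)).map
        (fun p => p.1 + p.2 - 1)) with
    | nil => rw [hL] at e1; simp at e1
    | cons d t =>
      rw [hL] at e1
      simp only [List.getElem?_cons_zero, Option.some.injEq] at e1
      have hd : 0 ≤ d := by
        have h1 := fRun_pos (((b0 :: bs).take 1).reverse) (by simp)
        have h2 := fRun_pos ((b0 :: bs).drop 0) (by simp)
        omega
      exact foldl_if_max t d hd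

-- ===== VERDICT (by name: the statement is the Claim_ definition above) =====
theorem solution_spec : Claim_equal_solution := by
  intro boxes _
  show solution boxes = solution_alt boxes
  exact solution_eq_alt boxes
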